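-- pv_equiv track=rewrite | github.com/lpp-crypto/sboxU | sboxU/ccz.py | fixed_table_sets
-- ===== SOURCE A (Python) =====
-- from collections import defaultdict
--
-- def fixed_table_sets(l):
--     by_val = defaultdict(list)
--     for a in range(0, len(l)):
--         for b in range(0, len(l)):
--             by_val[l[a][b]].append([a, b])
--     unsorted_result = []
--     for c in by_val.keys():
--         unsorted_result.append([len(by_val[c]), by_val[c]])
--     unsorted_result.sort()
--     return [entry[1] for entry in unsorted_result]
-- ===== SOURCE B (Python) =====
-- def fixed_table_sets(l):
--     n = len(l)
--     cells = [(l[a][b], a, b) for a in range(n) for b in range(n)]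
--     cells.sort(key=lambda c: c[0])
--     groups = []
--     prev = None
--     for v, a, b in cells:
--         if groups and v == prev:
--             groups[-1].append([a, b])
--         else:
--             groups.append([[a, b]])
--         prev = v
--     groups.sort(key=lambda g: (len(g), g))
--     return groups
-- ===== Notes on version B (the rewrite author's own statement) =====
-- stated objective: alternative
-- what changed: B replaces A's defaultdict hash-grouping by flattening the table into (value,a,b) cells, stably sorting them by value and collecting runs of equal values in one scan, then sorting the groups with the tuple key (count, positions) instead of sorting [count, positions] list entries.
import Mathlib
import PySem

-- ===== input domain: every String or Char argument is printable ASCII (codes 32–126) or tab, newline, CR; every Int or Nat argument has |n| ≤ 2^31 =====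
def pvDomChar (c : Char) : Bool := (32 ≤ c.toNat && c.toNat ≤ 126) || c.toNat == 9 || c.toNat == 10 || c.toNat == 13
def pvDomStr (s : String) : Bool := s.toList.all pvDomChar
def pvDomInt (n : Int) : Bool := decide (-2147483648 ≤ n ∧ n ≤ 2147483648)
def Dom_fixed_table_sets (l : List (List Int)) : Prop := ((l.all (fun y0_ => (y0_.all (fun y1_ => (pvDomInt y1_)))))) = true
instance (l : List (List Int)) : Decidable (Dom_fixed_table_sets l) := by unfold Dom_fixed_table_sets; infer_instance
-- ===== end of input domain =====

-- B replaces A's defaultdict hash-grouping by flatten–sort–scan run grouping and sorts the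
-- groups by the tuple key (count, positions); same return value, no speed claim (objective: alternative).

-- ===== PORT A =====
def fixed_table_sets (l : List (List Int)) : List (List (List Int)) :=
  let n := PySem.List.len l
  let by_val : PySem.Dict Int (List (List Int)) :=
    (PySem.List.pyRange 0 n 1).foldl (fun d a =>
      (PySem.List.pyRange 0 n 1).foldl (fun d b =>
        d.modify (PySem.List.pyGetD (PySem.List.pyGetD l a []) b 0) []
          (fun g => g ++ [[a, b]])) d)
      PySem.Dict.empty
  let unsorted_result : List (Int × List (List Int)) :=
    by_val.keys.foldl (fun acc c =>
      acc ++ [(PySem.List.len (by_val.getD c []), by_val.getD c [])]) []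
  (PySem.List.sorted2 unsorted_result (fun e => e.1) (fun e => e.2)).map (fun e => e.2)

-- ===== PORT B =====
def fixed_table_sets_alt (l : List (List Int)) : List (List (List Int)) :=
  let n := PySem.List.len l
  let cells : List (Int × Int × Int) :=
    (PySem.List.pyRange 0 n 1).flatMap (fun a =>
      (PySem.List.pyRange 0 n 1).map (fun b =>
        (PySem.List.pyGetD (PySem.List.pyGetD l a []) b 0, a, b)))
  let sortedCells := PySem.List.sorted cells (fun c => c.1)
  let st := sortedCells.foldl
    (fun (st : List (List (List Int)) × Option Int) c =>
      if st.1 ≠ [] ∧ st.2 = some c.1 then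
        (st.1.dropLast ++ [(st.1.getLast?.getD []) ++ [[c.2.1, c.2.2]]], some c.1)
      else
        (st.1 ++ [[[c.2.1, c.2.2]]], some c.1))
    ([], none)
  PySem.List.sorted2 st.1 (fun g => PySem.List.len g) (fun g => g)

-- ===== PRECONDITION & SPEC =====
-- Pre_ excludes exactly the ragged tables on which A raises IndexError (a row shorter than len(l)).
def Pre_fixed_table_sets (l : List (List Int)) : Prop := ∀ r ∈ l, l.length ≤ r.length
instance (l : List (List Int)) : Decidable (Pre_fixed_table_sets l) := by unfold Pre_fixed_table_sets; infer_instance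
def pvWitness_fixed_table_sets : List (List Int) := [[1, 2], [2, 1]]
def Spec_fixed_table_sets (l : List (List Int)) (out : List (List (List Int))) : Prop := out = fixed_table_sets_alt l
instance (l : List (List Int)) (out : List (List (List Int))) : Decidable (Spec_fixed_table_sets l out) := by unfold Spec_fixed_table_sets; infer_instance

-- ===== CLAIM (what is proved, stated in full; the proofs are below) =====
def Claim_equal_fixed_table_sets : Prop := ∀ (l : List (List Int)), Dom_fixed_table_sets l → Pre_fixed_table_sets l → Spec_fixed_table_sets l (fixed_table_sets l)

-- ===== LEMMAS AND PROOFS =====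

-- the flattened table in row-major order, as (value, a, b) cells
def pvCells (l : List (List Int)) : List (Int × Int × Int) :=
  (PySem.List.pyRange 0 (PySem.List.len l) 1).flatMap (fun a =>
    (PySem.List.pyRange 0 (PySem.List.len l) 1).map (fun b =>
      (PySem.List.pyGetD (PySem.List.pyGetD l a []) b 0, a, b)))

def pvPos (c : Int × Int × Int) : List Int := [c.2.1, c.2.2]

-- the positions of value v, in the order of cs
def pvGp (cs : List (Int × Int × Int)) (v : Int) : List (List Int) :=
  (cs.filter (fun c => c.1 == v)).map pvPos

-- groups of cs: one per distinct value (first-occurrence order of cs), positions in cs order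
def pvGroups (cs : List (Int × Int × Int)) : List (List (List Int)) :=
  (PySem.List.dedup (cs.map (fun c => c.1))).map (pvGp cs)

def pvKeyLex (g : List (List Int)) : Lex (Int × List (List Int)) := toLex (PySem.List.len g, g)

theorem pvInsertBy_map {α β : Type} (f : α → β) (bf : α → α → Bool) (bf' : β → β → Bool)
    (h : ∀ a b, bf' (f a) (f b) = bf a b) (x : α) :
    ∀ ys : List α, PySem.List.insertBy bf' (f x) (ys.map f) = (PySem.List.insertBy bf x ys).map f := by
  intro ys
  induction ys with
  | nil => simp [PySem.List.insertBy]
  | cons y t ih =>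
    by_cases hb : bf x y
    · simp [PySem.List.insertBy, h, hb]
    · simp [PySem.List.insertBy, h, hb, ih]

theorem pvFoldl_insertBy_map {α β : Type} (f : α → β) (bf : α → α → Bool) (bf' : β → β → Bool)
    (h : ∀ a b, bf' (f a) (f b) = bf a b) :
    ∀ (gs : List α) (acc : List α),
      gs.foldl (fun a x => PySem.List.insertBy bf' (f x) a) (acc.map f) =
        (gs.foldl (fun a x => PySem.List.insertBy bf x a) acc).map f := by
  intro gs
  induction gs with
  | nil => intro acc; rfl
  | cons g t ih =>
    intro acc
    simp only [List.foldl_cons]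
    rw [pvInsertBy_map f bf bf' h g acc, ih]

def pvEmb (g : List (List Int)) : Int × List (List Int) := (PySem.List.len g, g)

theorem pvSorted2_map_emb (gs : List (List (List Int))) :
    PySem.List.sorted2 (gs.map pvEmb) (fun e => e.1) (fun e => e.2) =
      (PySem.List.sorted2 gs (fun g => PySem.List.len g) (fun g => g)).map pvEmb := by
  unfold PySem.List.sorted2
  simp only [List.foldl_map]
  exact pvFoldl_insertBy_map pvEmb _ _ (fun a b => rfl) gs []

theorem pvSorted2_eq_sorted_keyLex (gs : List (List (List Int))) :
    PySem.List.sorted2 gs (fun g => PySem.List.len g) (fun g => g) =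
      PySem.List.sorted gs pvKeyLex := by
  unfold PySem.List.sorted2 PySem.List.sorted
  have hb : (fun a b : List (List Int) =>
        (decide (PySem.List.len a < PySem.List.len b) ||
          (!decide (PySem.List.len b < PySem.List.len a) && decide (a < b)))) =
      (fun a b : List (List Int) => decide (pvKeyLex a < pvKeyLex b)) := by
    funext a b
    have hiff : pvKeyLex a < pvKeyLex b ↔
        (PySem.List.len a < PySem.List.len b ∨
          (PySem.List.len a = PySem.List.len b ∧ a < b)) := by
      unfold pvKeyLex
      exact Prod.Lex.lt_iff
    rcases lt_trichotomy a.length b.length with h | h | h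
    · simp [hiff, h, Nat.lt_asymm h]
    · simp [hiff, h]
    · simp [hiff, h, Nat.lt_asymm h, ne_of_gt h]
  rw [hb]

theorem pvA_eq (l : List (List Int)) :
    fixed_table_sets l = PySem.List.sorted (pvGroups (pvCells l)) pvKeyLex := by
  show (fun l => let n := PySem.List.len l
    let by_val : PySem.Dict Int (List (List Int)) :=
      (PySem.List.pyRange 0 n 1).foldl (fun d a =>
        (PySem.List.pyRange 0 n 1).foldl (fun d b =>
          d.modify (PySem.List.pyGetD (PySem.List.pyGetD l a []) b 0) []
            (fun g => g ++ [[a, b]])) d)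
        PySem.Dict.empty
    let unsorted_result : List (Int × List (List Int)) :=
      by_val.keys.foldl (fun acc c =>
        acc ++ [(PySem.List.len (by_val.getD c []), by_val.getD c [])]) []
    (PySem.List.sorted2 unsorted_result (fun e => e.1) (fun e => e.2)).map (fun e => e.2)) l
    = PySem.List.sorted (pvGroups (pvCells l)) pvKeyLex
  simp only []
  have hbv :
      (PySem.List.pyRange 0 (PySem.List.len l) 1).foldl (fun d a =>
        (PySem.List.pyRange 0 (PySem.List.len l) 1).foldl (fun d b =>
          d.modify (PySem.List.pyGetD (PySem.List.pyGetD l a []) b 0) []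
            (fun g => g ++ [[a, b]])) d)
        (PySem.Dict.empty : PySem.Dict Int (List (List Int))) =
      ((pvCells l).map (fun c => (c.1, pvPos c))).foldl
        (fun d p => d.modify p.1 [] (fun g => g ++ [p.2])) PySem.Dict.empty := by
    unfold pvCells pvPos
    simp only [List.foldl_map, List.map_flatMap, List.foldl_flatMap]
  rw [hbv]
  have hkeys : (((pvCells l).map (fun c => (c.1, pvPos c))).foldl
        (fun d p => d.modify p.1 [] (fun g => g ++ [p.2])) PySem.Dict.empty).keys =
      PySem.List.dedup ((pvCells l).map (fun c => c.1)) := by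
    rw [PySem.Dict.keys_foldl_modify_key]
    rw [List.map_map]
    rw [PySem.List.dedup_eq_ofList]
    rfl
  have hgetD : ∀ v, (((pvCells l).map (fun c => (c.1, pvPos c))).foldl
        (fun d p => d.modify p.1 [] (fun g => g ++ [p.2])) PySem.Dict.empty).getD v [] =
      pvGp (pvCells l) v := by
    intro v
    rw [PySem.Dict.getD_foldl_modify_append]
    unfold pvGp
    rw [List.filter_map, List.map_map]
    rfl
  rw [PySem.List.foldl_append_singleton_eq_map, List.nil_append, hkeys]
  have hentry : (PySem.List.dedup ((pvCells l).map (fun c => c.1))).map (fun c =>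
        (PySem.List.len ((((pvCells l).map (fun cc => (cc.1, pvPos cc))).foldl
          (fun d p => d.modify p.1 [] (fun g => g ++ [p.2])) PySem.Dict.empty).getD c []),
         (((pvCells l).map (fun cc => (cc.1, pvPos cc))).foldl
          (fun d p => d.modify p.1 [] (fun g => g ++ [p.2])) PySem.Dict.empty).getD c [])) =
      ((PySem.List.dedup ((pvCells l).map (fun c => c.1))).map (pvGp (pvCells l))).map pvEmb := by
    rw [List.map_map]
    exact List.map_congr_left (fun v _ => by rw [Function.comp_apply, hgetD v]; rfl)
  rw [hentry, pvSorted2_map_emb, List.map_map]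
  have hid : ((fun e : Int × List (List Int) => e.2) ∘ pvEmb) = id := rfl
  rw [hid, List.map_id]
  rw [pvSorted2_eq_sorted_keyLex]
  rfl

def pvStep (st : List (List (List Int)) × Option Int) (c : Int × Int × Int) :
    List (List (List Int)) × Option Int :=
  if st.1 ≠ [] ∧ st.2 = some c.1 then
    (st.1.dropLast ++ [(st.1.getLast?.getD []) ++ [[c.2.1, c.2.2]]], some c.1)
  else
    (st.1 ++ [[[c.2.1, c.2.2]]], some c.1)

theorem pvScanRun (w : Int) :
    ∀ (r : List (Int × Int × Int)), (∀ c ∈ r, c.1 = w) →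
      ∀ (G : List (List (List Int))) (g : List (List Int)),
        r.foldl pvStep (G ++ [g], some w) = (G ++ [g ++ r.map pvPos], some w) := by
  intro r
  induction r with
  | nil => intro _ G g; simp
  | cons c t ih =>
    intro hall G g
    have hc : c.1 = w := hall c List.mem_cons_self
    rw [List.foldl_cons]
    have hstep : pvStep (G ++ [g], some w) c = (G ++ [g ++ [pvPos c]], some w) := by
      unfold pvStep
      rw [if_pos ⟨by simp, by rw [hc]⟩]
      simp [hc, pvPos]
    rw [hstep, ih (fun z hz => hall z (List.mem_cons_of_mem c hz)) G (g ++ [pvPos c])]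
    simp

theorem pvOfList_const (v : Int) :
    ∀ (xs : List Int), (∀ x ∈ xs, x = v) → PySem.Set.update [v] xs = [v] := by
  intro xs
  induction xs with
  | nil => intro _; rfl
  | cons x t ih =>
    intro hall
    have hx : x = v := hall x List.mem_cons_self
    have hadd : PySem.Set.add [v] x = [v] := by
      rw [PySem.Set.add_of_mem]
      rw [hx]
      exact List.mem_singleton.mpr rfl
    show List.foldl PySem.Set.add (PySem.Set.add [v] x) t = [v]
    rw [hadd]
    exact ih (fun z hz => hall z (List.mem_cons_of_mem x hz))

theorem pvUpdate_cons_not_mem (v : Int) :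
    ∀ (xs : List Int) (s : List Int), v ∉ xs →
      PySem.Set.update (v :: s) xs = v :: PySem.Set.update s xs := by
  intro xs
  induction xs with
  | nil => intro s _; rfl
  | cons x t ih =>
    intro s hv
    have hxv : x ≠ v := fun h => hv (by rw [h]; exact List.mem_cons_self)
    have hadd : PySem.Set.add (v :: s) x = v :: PySem.Set.add s x := by
      by_cases hc : x ∈ s
      · rw [PySem.Set.add_of_mem (List.mem_cons_of_mem v hc), PySem.Set.add_of_mem hc]
      · rw [PySem.Set.add_of_not_mem (by
          intro h
          rcases List.mem_cons.mp h with h | h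
          · exact hxv h
          · exact hc h), PySem.Set.add_of_not_mem hc]
        rfl
    have hvt : v ∉ t := fun h => hv (List.mem_cons_of_mem x h)
    show List.foldl PySem.Set.add (PySem.Set.add (v :: s) x) t =
      v :: List.foldl PySem.Set.add (PySem.Set.add s x) t
    rw [hadd]
    exact ih (PySem.Set.add s x) hvt

theorem pvGroups_cons_run (c : Int × Int × Int) (r1 r2 : List (Int × Int × Int))
    (h1 : ∀ z ∈ r1, z.1 = c.1) (h2 : ∀ z ∈ r2, z.1 ≠ c.1) :
    pvGroups (c :: (r1 ++ r2)) = ([pvPos c] ++ r1.map pvPos) :: pvGroups r2 := by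
  have hded : PySem.List.dedup ((c :: (r1 ++ r2)).map (fun z => z.1)) =
      c.1 :: PySem.List.dedup (r2.map (fun z => z.1)) := by
    rw [PySem.List.dedup_eq_ofList, PySem.List.dedup_eq_ofList, List.map_cons, List.map_append]
    show List.foldl PySem.Set.add PySem.Set.empty
        (c.1 :: (r1.map (fun z => z.1) ++ r2.map (fun z => z.1))) = _
    rw [List.foldl_cons, List.foldl_append]
    have he : PySem.Set.add PySem.Set.empty c.1 = [c.1] := by
      rfl
    rw [he]
    have hcr1 : List.foldl PySem.Set.add [c.1] (r1.map (fun z => z.1)) = [c.1] :=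
      pvOfList_const c.1 _ (by
        intro x hx
        rcases List.mem_map.mp hx with ⟨z, hz, hzx⟩
        rw [← hzx]; exact h1 z hz)
    rw [hcr1]
    have hnm : c.1 ∉ r2.map (fun z => z.1) := by
      intro h
      rcases List.mem_map.mp h with ⟨z, hz, hzx⟩
      exact h2 z hz hzx
    exact pvUpdate_cons_not_mem c.1 _ [] hnm
  unfold pvGroups
  rw [hded, List.map_cons]
  have hgp1 : pvGp (c :: (r1 ++ r2)) c.1 = [pvPos c] ++ r1.map pvPos := by
    unfold pvGp
    rw [List.filter_cons_of_pos (by simp), List.filter_append,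
      List.filter_eq_self.mpr (fun z hz => by simp [h1 z hz]),
      List.filter_eq_nil_iff.mpr (fun z hz => by simp [h2 z hz]),
      List.append_nil]
    rfl
  rw [hgp1]
  congr 1
  refine List.map_congr_left ?_
  intro v hv
  have hvr2 : v ∈ r2.map (fun z => z.1) := by
    rw [PySem.List.dedup_eq_ofList] at hv
    exact (PySem.Set.mem_ofList _ _).mp hv
  rcases List.mem_map.mp hvr2 with ⟨z0, hz0, hz0v⟩
  have hvne : v ≠ c.1 := fun h => h2 z0 hz0 (by rw [hz0v, h])
  unfold pvGp
  rw [List.filter_cons_of_neg (by simp [Ne.symm hvne]), List.filter_append,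
    List.filter_eq_nil_iff.mpr (fun z hz => by simp [h1 z hz, Ne.symm hvne]),
    List.nil_append]

theorem pvScanMain :
    ∀ (k : Nat) (fl : List (Int × Int × Int)), fl.length ≤ k →
      fl.Pairwise (fun a b => a.1 ≤ b.1) →
      ∀ (G : List (List (List Int))) (p : Option Int),
        (∀ c, fl.head? = some c → p ≠ some c.1) →
        (fl.foldl pvStep (G, p)).1 = G ++ pvGroups fl := by
  intro k
  induction k with
  | zero =>
    intro fl hlen _ G p _
    have : fl = [] := List.eq_nil_of_length_eq_zero (Nat.le_zero.mp hlen)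
    subst this
    simp [pvGroups, PySem.List.dedup]
  | succ k ih =>
    intro fl hlen hp G p hhead
    cases fl with
    | nil => simp [pvGroups, PySem.List.dedup]
    | cons c rest =>
      rw [List.foldl_cons]
      have hstep : pvStep (G, p) c = (G ++ [[pvPos c]], some c.1) := by
        unfold pvStep
        rw [if_neg (fun h => hhead c rfl h.2)]
        rfl
      rw [hstep]
      have hsplit : rest = rest.takeWhile (fun z => z.1 == c.1) ++
          rest.dropWhile (fun z => z.1 == c.1) := List.takeWhile_append_dropWhile.symm
      have hall1 : ∀ z ∈ rest.takeWhile (fun z => z.1 == c.1), z.1 = c.1 := by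
        intro z hz
        have := List.mem_takeWhile_imp hz
        simpa using this
      have hrestle : ∀ z ∈ rest, c.1 ≤ z.1 := (List.pairwise_cons.mp hp).1
      have hprest : rest.Pairwise (fun a b => a.1 ≤ b.1) := (List.pairwise_cons.mp hp).2
      have hp2 : (rest.dropWhile (fun z => z.1 == c.1)).Pairwise (fun a b => a.1 ≤ b.1) :=
        hprest.sublist (List.dropWhile_sublist _)
      have hall2 : ∀ z ∈ rest.dropWhile (fun z => z.1 == c.1), z.1 ≠ c.1 := by
        cases hr2c : rest.dropWhile (fun z => z.1 == c.1) with
        | nil => simp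
        | cons d t2 =>
          have hd := List.head?_dropWhile_not (fun z => z.1 == c.1) rest
          rw [hr2c] at hd
          have hdne : d.1 ≠ c.1 := by simpa using hd
          have hdle : c.1 ≤ d.1 := hrestle d
            ((List.dropWhile_sublist _).mem (by rw [hr2c]; exact List.mem_cons_self))
          have hdlt : c.1 < d.1 := lt_of_le_of_ne hdle (Ne.symm hdne)
          intro z hz
          rcases List.mem_cons.mp hz with h | h
          · rw [h]; exact hdne
          · have hdz : d.1 ≤ z.1 := (List.pairwise_cons.mp (hr2c ▸ hp2)).1 z h
            omega
      have hlen2 : (rest.dropWhile (fun z => z.1 == c.1)).length ≤ k := by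
        have h1 := List.length_dropWhile_le (fun z : Int × Int × Int => z.1 == c.1) rest
        simp only [List.length_cons] at hlen
        omega
      have hhead2 : ∀ d, (rest.dropWhile (fun z => z.1 == c.1)).head? = some d →
          (some c.1 : Option Int) ≠ some d.1 := by
        intro d hd heq
        have hmem : d ∈ rest.dropWhile (fun z => z.1 == c.1) := List.mem_of_mem_head? hd
        exact hall2 d hmem (by injection heq with h; exact h.symm)
      conv_lhs => rw [hsplit]
      rw [List.foldl_append, pvScanRun c.1 _ hall1 G [pvPos c],
        ih _ hlen2 hp2 _ (some c.1) hhead2]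
      have hg := pvGroups_cons_run c _ _ hall1 hall2
      rw [show (c :: rest : List (Int × Int × Int)) = c :: (rest.takeWhile (fun z => z.1 == c.1) ++ rest.dropWhile (fun z => z.1 == c.1)) from by rw [← hsplit], hg]
      simp

theorem pvB_eq (l : List (List Int)) :
    fixed_table_sets_alt l =
      PySem.List.sorted (pvGroups (PySem.List.sorted (pvCells l) (fun c => c.1))) pvKeyLex := by
  show PySem.List.sorted2
      ((PySem.List.sorted (pvCells l) (fun c => c.1)).foldl pvStep ([], none)).1
      (fun g => PySem.List.len g) (fun g => g) = _
  rw [pvScanMain (PySem.List.sorted (pvCells l) (fun c => c.1)).length _ (le_refl _)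
    (PySem.List.sorted_pairwise (pvCells l) (fun c => c.1)) [] none (by simp),
    List.nil_append, pvSorted2_eq_sorted_keyLex]


theorem pvFilter_insertBy (x : Int × Int × Int) (v : Int) :
    ∀ ys : List (Int × Int × Int), ys.Pairwise (fun a b => a.1 ≤ b.1) →
      (PySem.List.insertBy (fun a b => decide (a.1 < b.1)) x ys).filter (fun c => c.1 == v) =
        if x.1 = v then ys.filter (fun c => c.1 == v) ++ [x] else ys.filter (fun c => c.1 == v) := by
  intro ys
  induction ys with
  | nil =>
    intro _
    by_cases h : x.1 = v <;> simp [PySem.List.insertBy, h]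
  | cons y t ih =>
    intro hp
    have ht : t.Pairwise (fun a b => a.1 ≤ b.1) := hp.of_cons
    by_cases hxy : x.1 < y.1
    · have hins : PySem.List.insertBy (fun a b => decide (a.1 < b.1)) x (y :: t) = x :: y :: t := by
        simp [PySem.List.insertBy, hxy]
      have hge : ∀ z ∈ y :: t, y.1 ≤ z.1 := by
        intro z hz
        rcases List.mem_cons.mp hz with h | h
        · exact le_of_eq (by rw [h])
        · exact (List.pairwise_cons.mp hp).1 z h
      by_cases hxv : x.1 = v
      · have hnil : (y :: t).filter (fun c => c.1 == v) = [] := by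
          refine List.filter_eq_nil_iff.mpr ?_
          intro z hz
          have hzy := hge z hz
          simp only [beq_iff_eq]
          omega
        rw [hins, if_pos hxv, hnil, List.filter_cons_of_pos (by simp [hxv]), hnil]; rfl
      · rw [hins, if_neg hxv, List.filter_cons_of_neg (by simp [hxv])]
    · have hins : PySem.List.insertBy (fun a b => decide (a.1 < b.1)) x (y :: t) =
          y :: PySem.List.insertBy (fun a b => decide (a.1 < b.1)) x t := by
        simp [PySem.List.insertBy, hxy]
      rw [hins]
      by_cases hyv : y.1 = v
      · rw [List.filter_cons_of_pos (by simp [hyv]), ih ht,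
          List.filter_cons_of_pos (by simp [hyv])]
        by_cases hxv : x.1 = v <;> simp [hxv]
      · rw [List.filter_cons_of_neg (by simp [hyv]), ih ht,
          List.filter_cons_of_neg (by simp [hyv])]

theorem pvFilter_sorted (cs : List (Int × Int × Int)) (v : Int) :
    (PySem.List.sorted cs (fun c => c.1)).filter (fun c => c.1 == v) = cs.filter (fun c => c.1 == v) := by
  induction cs using List.reverseRecOn with
  | nil => rfl
  | append_singleton cs x ih =>
    have hstep : PySem.List.sorted (cs ++ [x]) (fun c => c.1) =
        PySem.List.insertBy (fun a b => decide (a.1 < b.1)) x (PySem.List.sorted cs (fun c => c.1)) := by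
      rw [PySem.List.sorted_eq_foldl_insertBy, PySem.List.sorted_eq_foldl_insertBy, List.foldl_append]
      rfl
    rw [hstep, pvFilter_insertBy x v _ (PySem.List.sorted_pairwise cs (fun c => c.1)),
      List.filter_append]
    split_ifs with hxv
    · simp [ih, hxv]
    · simp [ih, hxv]

theorem pvGp_sorted (cs : List (Int × Int × Int)) (v : Int) :
    pvGp (PySem.List.sorted cs (fun c => c.1)) v = pvGp cs v := by
  unfold pvGp; rw [pvFilter_sorted]

theorem pvGroups_perm (l : List (List Int)) :
    (pvGroups (PySem.List.sorted (pvCells l) (fun c => c.1))).Perm (pvGroups (pvCells l)) := by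
  have hperm : (PySem.List.sorted (pvCells l) (fun c => c.1)).Perm (pvCells l) :=
    PySem.List.sorted_perm _ _ _
  have hvals : ((PySem.List.sorted (pvCells l) (fun c => c.1)).map (fun c => c.1)).Perm
      ((pvCells l).map (fun c => c.1)) := hperm.map _
  have hded : (PySem.List.dedup ((PySem.List.sorted (pvCells l) (fun c => c.1)).map (fun c => c.1))).Perm
      (PySem.List.dedup ((pvCells l).map (fun c => c.1))) := by
    rw [PySem.List.dedup_eq_ofList, PySem.List.dedup_eq_ofList]
    refine (List.perm_ext_iff_of_nodup (PySem.Set.nodup_ofList _) (PySem.Set.nodup_ofList _)).mpr ?_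
    intro a
    rw [PySem.Set.mem_ofList, PySem.Set.mem_ofList]
    exact hvals.mem_iff
  unfold pvGroups
  rw [List.map_congr_left (fun v _ => pvGp_sorted (pvCells l) v)]
  exact hded.map _

-- ===== VERDICT (by name: the statement is the Claim_ definition above) =====
theorem fixed_table_sets_spec : Claim_equal_fixed_table_sets := by
  intro l _ _
  unfold Spec_fixed_table_sets
  rw [pvA_eq, pvB_eq]
  exact (PySem.List.sorted_eq_sorted_of_perm _ _ pvKeyLex
    (fun a b h => by
      simpa [pvKeyLex] using congrArg (fun x => (ofLex x).2) h)
    (pvGroups_perm l)).symm
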